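-- pv_equiv track=rewrite | github.com/pisterlabs/promptset | data/scraping/repos/andreweskeclarke~assistant/addons~jupyter_assistant_agent.py | add_comment_markers
-- ===== SOURCE A (Python) =====
-- def add_comment_markers(text):
--     # GPT still returns commentary even when I request it not to
--     # This code can prefix those comments with '#', assuming the text is mostly well formatted
--
--     robot_is_commenting = True
--     lines = text.split("\n")
--     for i, line in enumerate(lines):
--         if line.startswith("```"):
--             lines[i] = "# " + line
--             robot_is_commenting = not robot_is_commenting
--         elif robot_is_commenting:
--             lines[i] = "# " + line
--         elif "```" in line:
--             lines[i] = line.replace("```", "# ```")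
--     return "\n".join(lines)
-- ===== SOURCE B (Python) =====
-- def add_comment_markers(text):
--     lines = text.split("\n")
--     # one pass: for each line, number of fence-start lines strictly before it
--     fences_before = []
--     c = 0
--     for line in lines:
--         fences_before.append(c)
--         if line.startswith("```"):
--             c += 1
--     # pure transform pass driven by the precomputed parity
--     out = []
--     for line, k in zip(lines, fences_before):
--         if line.startswith("```"):
--             out.append("# " + line)
--         elif k % 2 == 0:
--             out.append("# " + line)
--         elif "```" in line:
--             out.append(line.replace("```", "# ```"))
--         else:
--             out.append(line)
--     return "\n".join(out)
-- ===== Notes on version B (the rewrite author's own statement) =====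
-- stated objective: alternative
-- what changed: Replaces A's single loop with a mutated running boolean by two separate passes: first a prefix count of fence-start lines before each index, then a pure per-line transform selected by that count's parity.
import Mathlib
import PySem

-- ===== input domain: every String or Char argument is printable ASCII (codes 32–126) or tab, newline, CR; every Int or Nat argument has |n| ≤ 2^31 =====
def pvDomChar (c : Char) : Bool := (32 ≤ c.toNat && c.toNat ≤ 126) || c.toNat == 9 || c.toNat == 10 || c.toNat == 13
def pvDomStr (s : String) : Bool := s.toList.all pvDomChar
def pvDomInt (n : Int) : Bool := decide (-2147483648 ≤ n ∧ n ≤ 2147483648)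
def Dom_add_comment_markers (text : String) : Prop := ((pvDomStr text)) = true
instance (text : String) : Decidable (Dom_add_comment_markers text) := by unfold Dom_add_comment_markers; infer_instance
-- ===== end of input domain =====

-- B replaces A's running boolean with a precomputed prefix count of fence lines consulted by parity (alternative decomposition, same cost).

-- ===== PORT A =====
-- A: one loop carrying the accumulated output and the mutated flag robot_is_commenting.
def add_comment_markers (text : String) : String :=
  let lines := (PySem.Str.split? text "\n").getD []
  let st := lines.foldl (fun (st : List String × Bool) line =>
    if PySem.Str.startswith line "```" then (st.1 ++ ["# " ++ line], !st.2)
    else if st.2 then (st.1 ++ ["# " ++ line], st.2)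
    else if PySem.Str.isIn "```" line then (st.1 ++ [PySem.Str.replace line "```" "# ```"], st.2)
    else (st.1 ++ [line], st.2)) ([], true)
  PySem.Str.join "\n" st.1

-- ===== PORT B =====
-- B: pass 1 builds fences_before (count of fence-start lines strictly before each index);
-- pass 2 maps each (line, count) pair to its output by the count's parity.
def add_comment_markers_alt (text : String) : String :=
  let lines := (PySem.Str.split? text "\n").getD []
  let fences_before := (lines.foldl (fun (st : List Nat × Nat) line =>
      (st.1 ++ [st.2], if PySem.Str.startswith line "```" then st.2 + 1 else st.2)) ([], 0)).1
  let out := (lines.zip fences_before).map (fun p =>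
      if PySem.Str.startswith p.1 "```" then "# " ++ p.1
      else if p.2 % 2 == 0 then "# " ++ p.1
      else if PySem.Str.isIn "```" p.1 then PySem.Str.replace p.1 "```" "# ```"
      else p.1)
  PySem.Str.join "\n" out

-- ===== PRECONDITION & SPEC =====
def Spec_add_comment_markers (text : String) (out : String) : Prop := out = add_comment_markers_alt text
instance (text : String) (out : String) : Decidable (Spec_add_comment_markers text out) := by unfold Spec_add_comment_markers; infer_instance

-- ===== CLAIM (what is proved, stated in full; the proofs are below) =====
def Claim_equal_add_comment_markers : Prop := ∀ (text : String), Dom_add_comment_markers text → Spec_add_comment_markers text (add_comment_markers text)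

-- ===== LEMMAS AND PROOFS =====

-- fences_before starting from count c, as a direct recursion
def pvCountsAux (lines : List String) (c : Nat) : List Nat :=
  match lines with
  | [] => []
  | l :: ls => c :: pvCountsAux ls (if PySem.Str.startswith l "```" then c + 1 else c)

lemma pvCountsFold (lines : List String) (acc : List Nat) (c : Nat) :
    (lines.foldl (fun (st : List Nat × Nat) line =>
      (st.1 ++ [st.2], if PySem.Str.startswith line "```" then st.2 + 1 else st.2)) (acc, c)).1
    = acc ++ pvCountsAux lines c := by
  induction lines generalizing acc c with
  | nil => simp [pvCountsAux]
  | cons l ls ih =>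
    rw [List.foldl_cons, ih, pvCountsAux, List.append_assoc]
    rfl

lemma pvMain (lines : List String) (acc : List String) (c : Nat) (b : Bool)
    (hb : b = decide (c % 2 = 0)) :
    (lines.foldl (fun (st : List String × Bool) line =>
      if PySem.Str.startswith line "```" then (st.1 ++ ["# " ++ line], !st.2)
      else if st.2 then (st.1 ++ ["# " ++ line], st.2)
      else if PySem.Str.isIn "```" line then (st.1 ++ [PySem.Str.replace line "```" "# ```"], st.2)
      else (st.1 ++ [line], st.2)) (acc, b)).1
    = acc ++ (lines.zip (pvCountsAux lines c)).map (fun p =>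
      if PySem.Str.startswith p.1 "```" then "# " ++ p.1
      else if p.2 % 2 == 0 then "# " ++ p.1
      else if PySem.Str.isIn "```" p.1 then PySem.Str.replace p.1 "```" "# ```"
      else p.1) := by
  induction lines generalizing acc c b with
  | nil => simp
  | cons l ls ih =>
    simp only [List.foldl_cons, pvCountsAux, List.zip_cons_cons, List.map_cons]
    by_cases hf : PySem.Str.startswith l "```" = true
    · have hb' : (!b) = decide ((c + 1) % 2 = 0) := by
        subst hb
        rcases Nat.mod_two_eq_zero_or_one c with h | h <;>
          simp [h, Nat.add_mod]
      simp only [hf, if_pos]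
      rw [ih (acc ++ ["# " ++ l]) (c + 1) (!b) hb']
      simp
    · simp only [if_neg hf]
      rcases Nat.mod_two_eq_zero_or_one c with h | h
      · have hbt : b = true := by simp [hb, h]
        have hm : (c % 2 == 0) = true := by simp [h]
        simp only [hbt, hm, if_pos]
        rw [ih (acc ++ ["# " ++ l]) c true (by simp [h])]
        simp
      · have hbt : b = false := by simp [hb, h]
        have hm : ¬ ((c % 2 == 0) = true) := by simp [h]
        simp only [hbt, Bool.false_eq_true, if_false, if_neg hm]
        by_cases hin : PySem.Str.isIn "```" l = true
        · simp only [hin, if_pos]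
          rw [ih (acc ++ [PySem.Str.replace l "```" "# ```"]) c false (by simp [h])]
          simp
        · simp only [if_neg hin]
          rw [ih (acc ++ [l]) c false (by simp [h])]
          simp

-- ===== VERDICT (by name: the statement is the Claim_ definition above) =====
theorem add_comment_markers_spec : Claim_equal_add_comment_markers := by
  intro text _
  simp only [Spec_add_comment_markers, add_comment_markers, add_comment_markers_alt]
  rw [pvCountsFold, pvMain _ _ 0 true (by simp)]
  simp
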